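-- pv_equiv track=rewrite | github.com/openstack/nova | nova/virt/hardware.py | format_cpu_spec
-- ===== SOURCE A (Python) =====
-- import typing as ty
--
-- def format_cpu_spec(
--     cpuset: ty.Set[int],
--     allow_ranges: bool = True,
-- ) -> str:
--     """Format a libvirt CPU range specification.
--
--     Format a set/list of CPU indexes as a libvirt CPU range
--     specification. If allow_ranges is true, it will try to detect
--     continuous ranges of CPUs, otherwise it will just list each CPU
--     index explicitly.
--
--     :param cpuset: set (or list) of CPU indexes
--     :param allow_ranges: Whether we should attempt to detect continuous ranges
--         of CPUs.
--
--     :returns: a formatted CPU range string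
--     """
--     # We attempt to detect ranges, but don't bother with
--     # trying to do range negations to minimize the overall
--     # spec string length
--     if allow_ranges:
--         ranges: ty.List[ty.List[int]] = []
--         previndex = None
--         for cpuindex in sorted(cpuset):
--             if previndex is None or previndex != (cpuindex - 1):
--                 ranges.append([])
--             ranges[-1].append(cpuindex)
--             previndex = cpuindex
--
--         parts = []
--         for entry in ranges:
--             if len(entry) == 1:
--                 parts.append(str(entry[0]))
--             else:
--                 parts.append("%d-%d" % (entry[0], entry[len(entry) - 1]))
--         return ",".join(parts)
--     else:
--         return ",".join(str(id) for id in sorted(cpuset))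
-- ===== SOURCE B (Python) =====
-- def format_cpu_spec(cpuset, allow_ranges=True):
--     xs = sorted(cpuset)
--     if not allow_ranges:
--         return ",".join(str(id) for id in xs)
--     # An element is a run start iff the element just before it is not its
--     # predecessor value, and a run end iff the element just after it is not
--     # its successor value; the k-th start pairs with the k-th end.
--     starts = [b for a, b in zip([None] + xs, xs) if a is None or a != b - 1]
--     ends = [a for a, b in zip(xs, xs[1:] + [None]) if b is None or b != a + 1]
--     return ",".join(str(a) if a == b else "%d-%d" % (a, b)
--                     for a, b in zip(starts, ends))
-- ===== Notes on version B (the rewrite author's own statement) =====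
-- stated objective: alternative
-- what changed: Replaces A's stateful scan that builds a list of run-lists (appending to ranges[-1] via previndex tracking) with a declarative staged computation: run starts and run ends are obtained as two independent adjacent-pair filters over the sorted list, zipped positionally into (start,end) pairs and formatted.
import Mathlib
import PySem

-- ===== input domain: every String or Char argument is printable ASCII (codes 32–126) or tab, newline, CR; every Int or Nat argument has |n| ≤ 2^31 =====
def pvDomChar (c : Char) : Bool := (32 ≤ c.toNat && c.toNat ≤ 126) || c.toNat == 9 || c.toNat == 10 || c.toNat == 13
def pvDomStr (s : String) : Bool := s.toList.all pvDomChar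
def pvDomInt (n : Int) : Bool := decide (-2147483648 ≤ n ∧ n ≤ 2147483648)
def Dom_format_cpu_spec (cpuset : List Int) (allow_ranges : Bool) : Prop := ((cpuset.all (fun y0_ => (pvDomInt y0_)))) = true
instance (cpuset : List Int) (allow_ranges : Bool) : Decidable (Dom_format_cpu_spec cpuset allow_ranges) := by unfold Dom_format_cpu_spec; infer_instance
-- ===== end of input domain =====

-- B replaces A's stateful run-building scan with two independent adjacent-pair
-- filters (run starts, run ends) zipped into (start,end) pairs (objective: alternative).

-- ===== PORT A =====
-- ranges[-1].append(c): append c to the last entry of the list-of-lists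
def pvAppendLast : List (List Int) → Int → List (List Int)
  | [], _ => []
  | [e], c => [e ++ [c]]
  | e :: es, c => e :: pvAppendLast es c

-- one iteration of A's first loop: state = (ranges, previndex)
def pvAStep (st : List (List Int) × Option Int) (c : Int) : List (List Int) × Option Int :=
  let rs := if st.2 = none ∨ st.2 ≠ some (c - 1) then st.1 ++ [[]] else st.1
  (pvAppendLast rs c, some c)

-- body of A's second loop (formatting one entry)
def pvAFmt (e : List Int) : String :=
  if e.length = 1 then PySem.Int.toStr (e.getD 0 0)
  else PySem.Int.toStr (e.getD 0 0) ++ "-" ++ PySem.Int.toStr (e.getD (e.length - 1) 0)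

def format_cpu_spec (cpuset : List Int) (allow_ranges : Bool) : String :=
  if allow_ranges then
    let ranges := ((PySem.List.sorted cpuset (fun x => x) false).foldl pvAStep ([], none)).1
    let parts := ranges.map pvAFmt
    PySem.Str.join "," parts
  else
    PySem.Str.join "," ((PySem.List.sorted cpuset (fun x => x) false).map PySem.Int.toStr)

-- ===== PORT B =====
-- 'a is None or a != b - 1' on a pair from zip([None] + xs, xs); Python's None is Option.none
def pvIsStart (p : Option Int × Int) : Bool :=
  match p.1 with | none => true | some a => a != p.2 - 1

-- 'b is None or b != a + 1' on a pair from zip(xs, xs[1:] + [None])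
def pvIsEnd (p : Int × Option Int) : Bool :=
  match p.2 with | none => true | some b => b != p.1 + 1

-- str(a) if a == b else "%d-%d" % (a, b)
def pvBFmt (a b : Int) : String :=
  if a = b then PySem.Int.toStr a else PySem.Int.toStr a ++ "-" ++ PySem.Int.toStr b

def format_cpu_spec_alt (cpuset : List Int) (allow_ranges : Bool) : String :=
  let xs := PySem.List.sorted cpuset (fun x => x) false
  if allow_ranges then
    let starts := ((List.zip ((none : Option Int) :: xs.map some) xs).filter pvIsStart).map Prod.snd
    let ends := ((List.zip xs ((xs.drop 1).map some ++ [(none : Option Int)])).filter pvIsEnd).map Prod.fst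
    PySem.Str.join "," ((List.zip starts ends).map (fun p => pvBFmt p.1 p.2))
  else
    PySem.Str.join "," (xs.map PySem.Int.toStr)

-- ===== PRECONDITION & SPEC =====
def Spec_format_cpu_spec (cpuset : List Int) (allow_ranges : Bool) (out : String) : Prop := out = format_cpu_spec_alt cpuset allow_ranges
instance (cpuset : List Int) (allow_ranges : Bool) (out : String) : Decidable (Spec_format_cpu_spec cpuset allow_ranges out) := by unfold Spec_format_cpu_spec; infer_instance

-- ===== CLAIM (what is proved, stated in full; the proofs are below) =====
def Claim_equal_format_cpu_spec : Prop := ∀ (cpuset : List Int) (allow_ranges : Bool), Dom_format_cpu_spec cpuset allow_ranges → Spec_format_cpu_spec cpuset allow_ranges (format_cpu_spec cpuset allow_ranges)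

-- ===== LEMMAS AND PROOFS =====

-- the run [a, a+1, …, b]
def pvRun (a b : Int) : List Int := (List.range (b - a + 1).toNat).map (fun (i : Nat) => a + (i : Int))

-- the (start, end) pairs of the maximal runs of the sequence b :: t, with a the
-- start of the run currently open at b
def pvRuns : Int → Int → List Int → List (Int × Int)
  | a, b, [] => [(a, b)]
  | a, b, c :: t => if c = b + 1 then pvRuns a c t else (a, b) :: pvRuns c c t

-- run starts among t, given previous element b
def pvStarts' : Int → List Int → List Int
  | _, [] => []
  | b, c :: t => (if c = b + 1 then [] else [c]) ++ pvStarts' c t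

-- run ends of the sequence c :: t
def pvEnds' : Int → List Int → List Int
  | c, [] => [c]
  | c, d :: t => (if d = c + 1 then [] else [c]) ++ pvEnds' d t

lemma pvRun_self (a : Int) : pvRun a a = [a] := by
  simp [pvRun]

lemma pvRun_snoc (a b : Int) (h : a ≤ b) : pvRun a b ++ [b + 1] = pvRun a (b + 1) := by
  have hn : (b + 1 - a + 1).toNat = (b - a + 1).toNat + 1 := by omega
  have hv : a + ((b - a + 1).toNat : Int) = b + 1 := by omega
  simp [pvRun, hn, List.range_succ]
  omega

lemma pvAppendLast_snoc (rs : List (List Int)) (e : List Int) (c : Int) :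
    pvAppendLast (rs ++ [e]) c = rs ++ [e ++ [c]] := by
  induction rs with
  | nil => rfl
  | cons x xs ih =>
    cases xs with
    | nil => cases e <;> rfl
    | cons y ys => simpa [pvAppendLast] using ih

lemma pvAFmt_run (a b : Int) (h : a ≤ b) : pvAFmt (pvRun a b) = pvBFmt a b := by
  have hlen : (pvRun a b).length = (b - a + 1).toNat := by simp [pvRun]
  rcases eq_or_lt_of_le h with rfl | hlt
  · simp [pvRun_self, pvAFmt, pvBFmt]
  · have h1 : (pvRun a b).length ≠ 1 := by rw [hlen]; omega
    have hg0 : (pvRun a b)[0]? = some a := by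
      rw [pvRun, List.getElem?_map, List.getElem?_range (by omega)]
      simp
    have hgl : (pvRun a b)[(pvRun a b).length - 1]? = some b := by
      rw [hlen, pvRun, List.getElem?_map, List.getElem?_range (by omega)]
      simp; omega
    simp [pvAFmt, pvBFmt, h1, List.getD, hg0, hgl, hlt.ne]

-- A's first loop produces exactly the runs described by pvRuns
lemma pvA_runs : ∀ (s : List Int) (rs : List (List Int)) (a b : Int), a ≤ b →
    ((s.foldl pvAStep (rs ++ [pvRun a b], some b)).1).map pvAFmt
      = rs.map pvAFmt ++ (pvRuns a b s).map (fun p => pvBFmt p.1 p.2) := by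
  intro s
  induction s with
  | nil =>
    intro rs a b h
    simp [pvRuns, List.map_append, pvAFmt_run a b h]
  | cons c t ih =>
    intro rs a b h
    simp only [List.foldl_cons]
    by_cases hc : c = b + 1
    · have hA : pvAStep (rs ++ [pvRun a b], some b) c = (rs ++ [pvRun a (b + 1)], some (b + 1)) := by
        subst hc
        have hcond : ¬ ((some b : Option Int) = none ∨ (some b : Option Int) ≠ some (b + 1 - 1)) := by
          simp
        simp only [pvAStep, if_neg hcond, pvAppendLast_snoc, pvRun_snoc a b h]
      rw [hA, show pvRuns a b (c :: t) = pvRuns a (b + 1) t by simp [pvRuns, hc]]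
      exact ih rs a (b + 1) (by omega)
    · have hA : pvAStep (rs ++ [pvRun a b], some b) c
          = ((rs ++ [pvRun a b]) ++ [pvRun c c], some c) := by
        have hcond : ((some b : Option Int) = none ∨ (some b : Option Int) ≠ some (c - 1)) := by
          right; simp; omega
        simp only [pvAStep, if_pos hcond]
        rw [pvAppendLast_snoc]
        simp [pvRun_self]
      rw [hA, show pvRuns a b (c :: t) = (a, b) :: pvRuns c c t by simp [pvRuns, hc]]
      rw [ih (rs ++ [pvRun a b]) c c le_rfl]
      simp [List.map_append, pvAFmt_run a b h]

-- B's starts filter computes pvStarts'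
lemma pvStarts_eq : ∀ (t : List Int) (b : Int),
    ((List.zip (some b :: t.map some) t).filter pvIsStart).map Prod.snd = pvStarts' b t := by
  intro t
  induction t with
  | nil => intro b; rfl
  | cons c t' ih =>
    intro b
    have : (b != c - 1) = !(decide (c = b + 1)) := by
      by_cases h : c = b + 1 <;> simp [h] <;> omega
    by_cases h : c = b + 1 <;>
      · simp [pvStarts', pvIsStart, this, h]
        exact ih _

-- B's ends filter computes pvEnds'
lemma pvEnds_eq : ∀ (t : List Int) (c : Int),
    ((List.zip (c :: t) (t.map some ++ [(none : Option Int)])).filter pvIsEnd).map Prod.fst = pvEnds' c t := by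
  intro t
  induction t with
  | nil => intro c; rfl
  | cons d t' ih =>
    intro c
    have : (d != c + 1) = !(decide (d = c + 1)) := by
      by_cases h : d = c + 1 <;> simp [h]
    by_cases h : d = c + 1 <;>
      · simp [pvEnds', pvIsEnd, this, h]
        exact ih _

-- zipping starts with ends recovers the runs
lemma pvZip_runs : ∀ (t : List Int) (a b : Int),
    List.zip (a :: pvStarts' b t) (pvEnds' b t) = pvRuns a b t := by
  intro t
  induction t with
  | nil => intro a b; rfl
  | cons c t' ih =>
    intro a b
    by_cases hc : c = b + 1
    · simp only [pvStarts', pvEnds', pvRuns, if_pos hc, List.nil_append]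
      exact ih a _
    · simp only [pvStarts', pvEnds', pvRuns, if_neg hc, List.singleton_append, List.zip_cons_cons]
      rw [ih c c]

-- ===== VERDICT (by name: the statement is the Claim_ definition above) =====
theorem format_cpu_spec_spec : Claim_equal_format_cpu_spec := by
  intro cpuset allow_ranges _
  unfold Spec_format_cpu_spec format_cpu_spec format_cpu_spec_alt
  cases allow_ranges with
  | false => simp
  | true =>
    simp only [if_pos]
    cases h : PySem.List.sorted cpuset (fun x => x) false with
    | nil => rfl
    | cons c t =>
      have h1 : pvAStep ([], none) c = ([] ++ [pvRun c c], some c) := by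
        simp [pvAStep, pvAppendLast, pvRun_self]
      simp only [List.foldl_cons, h1]
      rw [pvA_runs t [] c c le_rfl]
      simp only [List.map_cons, List.drop_succ_cons, List.drop_zero, List.zip_cons_cons]
      simp only [List.filter, pvIsStart, List.map_cons]
      rw [pvStarts_eq t c]
      rw [pvEnds_eq t c]
      rw [pvZip_runs t c c]
      simp
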